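-- pv_equiv track=rewrite | github.com/pypi-data/pypi-mirror-95 | packages/pythematics/pythematics-4.0.0.tar.gz/pythematics-4.0.0/pythematics/polynomials.py | shortArrays
-- ===== SOURCE A (Python) =====
-- from typing import Any, Union,List,Tuple # Type hints
--
-- def ValueToDict(l1):
--     __tmp__ : dict = {}
--     for item in l1[0]:
--         __tmp__[item] = l1[1][l1[0].index(item)]
--     return __tmp__
--
-- def shortArrays(l1 : Union[list,tuple],l2 : Union[list,tuple]):
--     a1 : list = [ [] , [] ]
--     a2 : list = [ [] , [] ]
--     c1 : list = list(l1[0])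
--     c2 : list = list(l2[0])
--     c1.sort() # Copy 1 short
--     c2.sort() # Copy 2 short
--     d1 : dict = ValueToDict(l1)
--     d2 : dict = ValueToDict(l2)
--     for item in c1:
--         a1[1].append(d1.get(item))
--     a1[0] = c1
--     for item in c2:
--         a2[1].append(d2.get(item))
--     a2[0] = c2
--     return a1,a2
-- ===== SOURCE B (Python) =====
-- def shortArrays(l1, l2):
--     def short(pair):
--         keys = list(pair[0])
--         # stable argsort of the keys; no dict: within a run of equal keys the
--         # first index is the key's first occurrence, so its value is reused.
--         order = sorted(range(len(keys)), key=lambda i: keys[i])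
--         sk, sv = [], []
--         for i in order:
--             k = keys[i]
--             if sk and sk[-1] == k:
--                 sv.append(sv[-1])
--             else:
--                 sv.append(pair[1][i])
--             sk.append(k)
--         return [sk, sv]
--     return short(l1), short(l2)
-- ===== Notes on version B (the rewrite author's own statement) =====
-- stated objective: alternative
-- what changed: B removes A's dictionary and per-key list.index scan entirely: it stably argsorts the key indices once, then emits keys and values in a single run-detecting scan over the sorted indices (the first index of each run of equal keys is the key's first occurrence, later ones reuse the previous output value); it trades A's hashing for the stability of the sort.
import Mathlib
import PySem

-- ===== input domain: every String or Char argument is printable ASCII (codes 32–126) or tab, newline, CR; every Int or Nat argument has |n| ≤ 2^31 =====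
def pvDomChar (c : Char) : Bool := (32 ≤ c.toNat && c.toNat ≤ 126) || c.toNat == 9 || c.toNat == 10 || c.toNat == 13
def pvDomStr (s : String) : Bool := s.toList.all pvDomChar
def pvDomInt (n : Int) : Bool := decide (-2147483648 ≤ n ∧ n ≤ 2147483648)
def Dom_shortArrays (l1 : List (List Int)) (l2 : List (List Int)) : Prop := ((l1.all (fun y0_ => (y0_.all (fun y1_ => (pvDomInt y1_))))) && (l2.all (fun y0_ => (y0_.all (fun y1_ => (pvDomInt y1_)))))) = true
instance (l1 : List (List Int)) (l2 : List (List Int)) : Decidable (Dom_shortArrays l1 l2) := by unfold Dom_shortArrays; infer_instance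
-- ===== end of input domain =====

-- B drops A's dict and per-key list.index scan entirely: it stably argsorts the key
-- indices and emits the values in one run-detecting scan (objective: alternative).

-- ===== PORT A =====
-- literal port of ValueToDict: for item in l1[0]: d[item] = l1[1][l1[0].index(item)]
-- (out-of-range accesses, where Python raises, take a default; Pre_ excludes those inputs)
def ValueToDict (l : List (List Int)) : PySem.Dict Int Int :=
  let keys := (PySem.List.pyGet? l 0).getD []
  let vals := (PySem.List.pyGet? l 1).getD []
  keys.foldl (fun d item => d.insert item (vals.getD ((PySem.List.index? keys item).getD 0) 0)) PySem.Dict.empty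

def shortArrays (l1 : List (List Int)) (l2 : List (List Int)) : List (List Int) × List (List Int) :=
  let c1 := PySem.List.sorted ((PySem.List.pyGet? l1 0).getD []) (fun x => x) false
  let c2 := PySem.List.sorted ((PySem.List.pyGet? l2 0).getD []) (fun x => x) false
  let d1 := ValueToDict l1
  let d2 := ValueToDict l2
  let a1v := c1.foldl (fun acc item => acc ++ [(d1.get? item).getD 0]) []
  let a2v := c2.foldl (fun acc item => acc ++ [(d2.get? item).getD 0]) []
  ([c1, a1v], [c2, a2v])

-- ===== PORT B =====
-- literal port of Source B's loop body: k = keys[i]; if sk and sk[-1] == k: sv.append(sv[-1])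
-- else: sv.append(pair[1][i]); sk.append(k)   ('sk and sk[-1] == k' is sk[-1]? = some k;
-- in-range accesses are ported with a default)
def shortStep (keys vals : List Int) (st : List Int × List Int) (i : Int) : List Int × List Int :=
  let k := PySem.List.pyGetD keys i 0
  if PySem.List.pyGet? st.1 (-1) = some k then
    (st.1 ++ [k], st.2 ++ [(PySem.List.pyGet? st.2 (-1)).getD 0])
  else
    (st.1 ++ [k], st.2 ++ [(PySem.List.pyGet? vals i).getD 0])

-- Source B's helper 'short': stable argsort of the indices, then one run-detecting scan
def shortOne (pair : List (List Int)) : List (List Int) :=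
  let keys := (PySem.List.pyGet? pair 0).getD []
  let vals := (PySem.List.pyGet? pair 1).getD []
  let order := PySem.List.sorted (PySem.List.pyRange 0 (PySem.List.len keys) 1) (fun i => PySem.List.pyGetD keys i 0) false
  let st := order.foldl (shortStep keys vals) ([], [])
  [st.1, st.2]

def shortArrays_alt (l1 : List (List Int)) (l2 : List (List Int)) : List (List Int) × List (List Int) :=
  (shortOne l1, shortOne l2)

-- ===== PRECONDITION & SPEC =====
-- Pre_ excludes exactly the inputs where Python A raises: an empty argument list (IndexError on
-- l[0]) or, when the key list is nonempty, a missing value list (IndexError on l[1]) or a key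
-- whose first-occurrence index is out of range of the value list (IndexError on l[1][...]).
def Pre_shortArrays (l1 : List (List Int)) (l2 : List (List Int)) : Prop :=
  (l1 ≠ [] ∧ (l1.headD [] ≠ [] →
    2 ≤ l1.length ∧ ∀ k ∈ l1.headD [], (l1.headD []).idxOf k < (l1.getD 1 []).length)) ∧
  (l2 ≠ [] ∧ (l2.headD [] ≠ [] →
    2 ≤ l2.length ∧ ∀ k ∈ l2.headD [], (l2.headD []).idxOf k < (l2.getD 1 []).length))
instance (l1 : List (List Int)) (l2 : List (List Int)) : Decidable (Pre_shortArrays l1 l2) := by unfold Pre_shortArrays; infer_instance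

def pvWitness_shortArrays : List (List Int) × List (List Int) := ([[3, 1, 2], [10, 20, 30]], [[5, 5], [7]])

def Spec_shortArrays (l1 : List (List Int)) (l2 : List (List Int)) (out : List (List Int) × List (List Int)) : Prop := out = shortArrays_alt l1 l2
instance (l1 : List (List Int)) (l2 : List (List Int)) (out : List (List Int) × List (List Int)) : Decidable (Spec_shortArrays l1 l2 out) := by unfold Spec_shortArrays; infer_instance

-- ===== CLAIM (what is proved, stated in full; the proofs are below) =====
def Claim_equal_shortArrays : Prop := ∀ (l1 : List (List Int)) (l2 : List (List Int)), Dom_shortArrays l1 l2 → Pre_shortArrays l1 l2 → Spec_shortArrays l1 l2 (shortArrays l1 l2)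

-- ===== LEMMAS AND PROOFS =====

-- idxOf is minimal: no earlier position holds the element
theorem idxOf_getElem_le (l : List Int) (m : Nat) (hm : m < l.length) :
    l.idxOf l[m] ≤ m := by
  induction l generalizing m with
  | nil => simp at hm
  | cons a t ih =>
    cases m with
    | zero => simp
    | succ m =>
      have hm' : m < t.length := by simpa using hm
      rw [List.getElem_cons_succ]
      by_cases ha : a = t[m]
      · rw [List.idxOf_cons_eq _ ha]
        omega
      · rw [List.idxOf_cons_ne _ ha]
        exact Nat.succ_le_succ (ih m hm')

-- the stability order on indices: key first, original index to break ties
def lexLt (key : Int → Int) (a b : Int) : Prop := key a < key b ∨ (key a = key b ∧ a < b)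

theorem lexLt_key_le {key : Int → Int} {a b : Int} (h : lexLt key a b) : key a ≤ key b := by
  rcases h with h | ⟨h, _⟩ <;> omega

-- inserting a strictly larger index into a lex-sorted list keeps it lex-sorted
theorem insertBy_pairwise_lex (key : Int → Int) (x : Int) (ys : List Int)
    (h1 : ys.Pairwise (lexLt key)) (h2 : ∀ y ∈ ys, y < x) :
    (PySem.List.insertBy (fun a b => decide (key a < key b)) x ys).Pairwise (lexLt key) := by
  induction ys with
  | nil => simp [PySem.List.insertBy]
  | cons y ys ih =>
    by_cases hb : key x < key y
    · have he : PySem.List.insertBy (fun a b => decide (key a < key b)) x (y :: ys) = x :: y :: ys := by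
        simp [PySem.List.insertBy, hb]
      rw [he]
      refine List.Pairwise.cons ?_ h1
      intro z hz
      rcases List.mem_cons.mp hz with rfl | hz'
      · exact Or.inl hb
      · exact Or.inl (lt_of_lt_of_le hb (lexLt_key_le (List.rel_of_pairwise_cons h1 hz')))
    · have he : PySem.List.insertBy (fun a b => decide (key a < key b)) x (y :: ys)
          = y :: PySem.List.insertBy (fun a b => decide (key a < key b)) x ys := by
        simp [PySem.List.insertBy, hb]
      rw [he]
      refine List.Pairwise.cons ?_ (ih (List.Pairwise.of_cons h1) (fun a ha => h2 a (List.mem_cons_of_mem _ ha)))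
      intro z hz
      rcases (PySem.List.mem_insertBy _ _ _ _).mp hz with rfl | hz'
      · by_cases hke : key y = key z
        · exact Or.inr ⟨hke, h2 y List.mem_cons_self⟩
        · exact Or.inl (by omega)
      · exact List.rel_of_pairwise_cons h1 hz'

-- stability of the insertion sort over a strictly increasing index list
theorem foldl_insertBy_pairwise_lex (key : Int → Int) (xs : List Int) :
    ∀ acc : List Int, acc.Pairwise (lexLt key) → (∀ a ∈ acc, ∀ x ∈ xs, a < x) →
    xs.Pairwise (· < ·) →
    (xs.foldl (fun acc x => PySem.List.insertBy (fun a b => decide (key a < key b)) x acc) acc).Pairwise (lexLt key) := by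
  induction xs with
  | nil => intro acc hacc _ _; exact hacc
  | cons x xs ih =>
    intro acc hacc hlt hxs
    simp only [List.foldl_cons]
    refine ih _ (insertBy_pairwise_lex key x acc hacc (fun a ha => hlt a ha x List.mem_cons_self)) ?_ (List.Pairwise.of_cons hxs)
    intro a ha z hz
    rcases (PySem.List.mem_insertBy _ _ _ _).mp ha with rfl | ha'
    · exact List.rel_of_pairwise_cons hxs hz
    · exact hlt a ha' z (List.mem_cons_of_mem _ hz)

theorem sorted_pyRange_pairwise_lex (key : Int → Int) (n : Int) :
    (PySem.List.sorted (PySem.List.pyRange 0 n 1) key false).Pairwise (lexLt key) := by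
  rw [PySem.List.sorted_eq_foldl_insertBy]
  exact foldl_insertBy_pairwise_lex key _ [] (by simp) (by simp) (PySem.List.pairwise_lt_pyRange_one 0 n)

-- a run start of the lex-sorted index order is the first occurrence of its key
theorem run_start_eq_idxOf (keys : List Int) (p s : List Int) (i : Int)
    (hperm : (p ++ i :: s).Perm (PySem.List.pyRange 0 (PySem.List.len keys) 1))
    (hpair : (p ++ i :: s).Pairwise (lexLt (fun j => PySem.List.pyGetD keys j 0)))
    (hC : PySem.List.pyGet? (p.map (fun j => PySem.List.pyGetD keys j 0)) (-1)
            ≠ some (PySem.List.pyGetD keys i 0)) :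
    0 ≤ i ∧ i.toNat = keys.idxOf (PySem.List.pyGetD keys i 0)
      ∧ PySem.List.pyGetD keys i 0 ∈ keys := by
  set K : Int → Int := fun j => PySem.List.pyGetD keys j 0 with hK
  have hmemiff : ∀ m : Int, m ∈ p ++ i :: s ↔ 0 ≤ m ∧ m < keys.length := by
    intro m
    rw [hperm.mem_iff, PySem.List.mem_pyRange_one, PySem.List.len_eq]
  have hiR : 0 ≤ i ∧ i < keys.length := (hmemiff i).mp (by simp)
  have hKi : K i = keys[i.toNat]'(by omega) := PySem.List.pyGetD_eq_getElem keys 0 hiR.1 hiR.2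
  have hmem : K i ∈ keys := hKi ▸ List.getElem_mem _
  set j := keys.idxOf (K i) with hj
  have hjlt : j < keys.length := List.idxOf_lt_length_of_mem hmem
  have hjget : keys[j] = K i := List.getElem_idxOf hjlt
  have hjle : j ≤ i.toNat := by
    have := idxOf_getElem_le keys i.toNat (by omega)
    rwa [← hKi] at this
  have hjmem : (j : Int) ∈ p ++ i :: s := by
    refine (hmemiff (j : Int)).mpr ⟨by positivity, by exact_mod_cast hjlt⟩
  have hKj : K (j : Int) = K i := by
    have : K (j : Int) = keys[((j : Int)).toNat]'(by simpa using hjlt) :=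
      PySem.List.pyGetD_eq_getElem keys 0 (by positivity) (by exact_mod_cast hjlt)
    simpa [hjget] using this
  obtain ⟨hp, hrest, hcross⟩ := List.pairwise_append.mp hpair
  rcases List.mem_append.mp hjmem with hjp | hjs
  · -- the first occurrence would sit in the prefix: then the last prefix key equals K i,
    -- contradicting the run-start condition hC
    exfalso
    have hpne : p ≠ [] := List.ne_nil_of_mem hjp
    set L := p.getLast hpne with hL
    have hCL : K L ≠ K i := by
      intro he
      apply hC
      rw [PySem.List.pyGet?_neg_one, List.getLast?_map,
          List.getLast?_eq_getLast_of_ne_nil hpne]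
      exact congrArg some he
    have hLi : K L ≤ K i :=
      lexLt_key_le (hcross L (List.getLast_mem hpne) i (by simp))
    have hiL : K i ≤ K L := by
      rcases eq_or_ne ((j : Int)) L with he | hne
      · exact le_of_eq (by rw [← hKj, he])
      · have hsplit : p.dropLast ++ [L] = p := List.dropLast_concat_getLast hpne
        have hjd : (j : Int) ∈ p.dropLast := by
          rcases List.mem_append.mp (hsplit ▸ hjp) with h | h
          · exact h
          · exact absurd (List.mem_singleton.mp h) hne
        have hpl : lexLt K ((j : Int)) L := by
          obtain ⟨_, _, hc⟩ := List.pairwise_append.mp (hsplit ▸ hp)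
          exact hc _ hjd _ (List.mem_singleton_self L)
        exact hKj ▸ lexLt_key_le hpl
    exact hCL (le_antisymm hLi hiL)
  · rcases List.mem_cons.mp hjs with he | hjs'
    · exact ⟨hiR.1, by omega, hmem⟩
    · -- the first occurrence after i in the order: lex order forces i < j, but j ≤ i
      exfalso
      have hrel : lexLt K i ((j : Int)) := List.rel_of_pairwise_cons hrest hjs'
      rcases hrel with h | ⟨_, h⟩
      · rw [hKj] at h; omega
      · omega

-- the scan invariant: starting from the translation of a processed prefix, the loop
-- turns the remaining sorted indices into keys and first-occurrence values
theorem fold_run (keys vals : List Int)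
    (hPre : ∀ k ∈ keys, keys.idxOf k < vals.length) :
    ∀ (s p : List Int),
      (p ++ s).Perm (PySem.List.pyRange 0 (PySem.List.len keys) 1) →
      (p ++ s).Pairwise (lexLt (fun j => PySem.List.pyGetD keys j 0)) →
      s.foldl (shortStep keys vals)
        (p.map (fun j => PySem.List.pyGetD keys j 0),
         (p.map (fun j => PySem.List.pyGetD keys j 0)).map (fun k => vals.getD (keys.idxOf k) 0))
      = ((p ++ s).map (fun j => PySem.List.pyGetD keys j 0),
         ((p ++ s).map (fun j => PySem.List.pyGetD keys j 0)).map (fun k => vals.getD (keys.idxOf k) 0)) := by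
  intro s
  induction s with
  | nil => intro p _ _; simp
  | cons i s ih =>
    intro p hperm hpair
    have hassoc : p ++ i :: s = (p ++ [i]) ++ s := by simp
    have hstep : shortStep keys vals
        (p.map (fun j => PySem.List.pyGetD keys j 0),
         (p.map (fun j => PySem.List.pyGetD keys j 0)).map (fun k => vals.getD (keys.idxOf k) 0)) i
        = ((p ++ [i]).map (fun j => PySem.List.pyGetD keys j 0),
           ((p ++ [i]).map (fun j => PySem.List.pyGetD keys j 0)).map (fun k => vals.getD (keys.idxOf k) 0)) := by
      by_cases hb : PySem.List.pyGet? (p.map (fun j => PySem.List.pyGetD keys j 0)) (-1)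
          = some (PySem.List.pyGetD keys i 0)
      · -- repeated key: the previous output value is reused
        have hlast : (p.map (fun j => PySem.List.pyGetD keys j 0)).getLast?
            = some (PySem.List.pyGetD keys i 0) := by
          rwa [PySem.List.pyGet?_neg_one] at hb
        have hv : PySem.List.pyGet?
            ((p.map (fun j => PySem.List.pyGetD keys j 0)).map (fun k => vals.getD (keys.idxOf k) 0)) (-1)
            = some (vals.getD (keys.idxOf (PySem.List.pyGetD keys i 0)) 0) := by
          rw [PySem.List.pyGet?_neg_one, List.getLast?_map, hlast]
          rfl
        unfold shortStep
        rw [if_pos hb, hv]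
        simp
      · -- run start: i is the first occurrence of its key
        obtain ⟨h0, hidx, hmem⟩ := run_start_eq_idxOf keys p s i hperm hpair hb
        have hvlt : keys.idxOf (PySem.List.pyGetD keys i 0) < vals.length := hPre _ hmem
        have hv : PySem.List.pyGet? vals i
            = some (vals.getD (keys.idxOf (PySem.List.pyGetD keys i 0)) 0) := by
          rw [PySem.List.pyGet?_of_nonneg vals h0, hidx]
          rw [List.getElem?_eq_getElem hvlt, List.getD_eq_getElem vals 0 hvlt]
        unfold shortStep
        rw [if_neg hb, hv]
        simp
    rw [List.foldl_cons, hstep]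
    rw [hassoc] at hperm hpair ⊢
    exact ih (p ++ [i]) hperm hpair

-- A's dict loop: overwriting insert with a value that depends only on the item
theorem get?_foldl_insert_fun (keys : List Int) (f : Int → Int) (d0 : PySem.Dict Int Int) (k : Int) :
    (keys.foldl (fun d item => d.insert item (f item)) d0).get? k
      = if k ∈ keys then some (f k) else d0.get? k := by
  induction keys generalizing d0 with
  | nil => simp
  | cons x xs ih =>
    simp only [List.foldl_cons, ih, List.mem_cons]
    by_cases hx : k ∈ xs
    · simp [hx]
    · by_cases hk : k = x
      · simp [hk, PySem.Dict.get?_insert_self]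
      · simp [hx, hk, PySem.Dict.get?_insert_of_ne _ _ hk]

-- for a member, index? returns its idxOf
theorem index?_getD_eq_idxOf (keys : List Int) (k : Int) (hk : k ∈ keys) :
    (PySem.List.index? keys k).getD 0 = keys.idxOf k := by
  rw [PySem.List.index?_eq_idxOf?]
  obtain ⟨n, hn⟩ := Option.isSome_iff_exists.mp (List.isSome_idxOf?.mpr hk)
  rw [hn, List.idxOf_eq_getD_idxOf?, hn]
  rfl

-- one argument's half of the equivalence
theorem half_eq (l : List (List Int))
    (h : l ≠ [] ∧ (l.headD [] ≠ [] →
      2 ≤ l.length ∧ ∀ k ∈ l.headD [], (l.headD []).idxOf k < (l.getD 1 []).length)) :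
    [PySem.List.sorted ((PySem.List.pyGet? l 0).getD []) (fun x => x) false,
     (PySem.List.sorted ((PySem.List.pyGet? l 0).getD []) (fun x => x) false).foldl
       (fun acc item => acc ++ [((ValueToDict l).get? item).getD 0]) []]
      = shortOne l := by
  obtain ⟨hne, himp⟩ := h
  set keys := (PySem.List.pyGet? l 0).getD [] with hkeys
  set vals := (PySem.List.pyGet? l 1).getD [] with hvals
  have hkeys_head : keys = l.headD [] := by
    cases l with
    | nil => exact absurd rfl hne
    | cons a t => simp [hkeys, PySem.List.pyGet?, PySem.List.pyIdx?]
  by_cases hke : keys = []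
  · -- no keys: both sides are [[], []]
    unfold shortOne ValueToDict
    rw [← hkeys, ← hvals, hke]
    simp [PySem.List.pyRange_one_eq_nil, PySem.List.sorted]
  · obtain ⟨hlen, hidx⟩ := himp (hkeys_head ▸ hke)
    have hvals_eq : vals = l.getD 1 [] := by
      cases l with
      | nil => exact absurd rfl hne
      | cons a t =>
        cases t with
        | nil => simp at hlen
        | cons b t' => simp [hvals, PySem.List.pyGet?, PySem.List.pyIdx?]
    have hPre : ∀ k ∈ keys, keys.idxOf k < vals.length := by
      intro k hk
      rw [hvals_eq, hkeys_head]
      exact hidx k (hkeys_head ▸ hk)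
    set K : Int → Int := fun j => PySem.List.pyGetD keys j 0 with hK
    set order := PySem.List.sorted (PySem.List.pyRange 0 (PySem.List.len keys) 1) K false with horder
    have hperm : order.Perm (PySem.List.pyRange 0 (PySem.List.len keys) 1) :=
      PySem.List.sorted_perm _ _ _
    have hpair : order.Pairwise (lexLt K) := sorted_pyRange_pairwise_lex K _
    -- the scanned keys ARE the sorted key list
    have hmapK : (PySem.List.pyRange 0 (PySem.List.len keys) 1).map K = keys := by
      exact PySem.List.map_pyGetD_pyRange_zero keys 0
    have hsorted : PySem.List.sorted keys (fun x => x) false = order.map K := by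
      refine PySem.List.sorted_id_eq_of_perm_of_pairwise keys (order.map K) ?_ ?_
      · exact hmapK ▸ hperm.map K
      · exact List.pairwise_map.mpr (hpair.imp (fun hab => lexLt_key_le hab))
    -- B's loop result, by the invariant with the empty prefix
    have hfold : order.foldl (shortStep keys vals) ([], [])
        = (order.map K, (order.map K).map (fun k => vals.getD (keys.idxOf k) 0)) := by
      have := fold_run keys vals hPre order [] (by simpa using hperm) (by simpa using hpair)
      simpa using this
    -- A's loop result: one dict lookup per sorted key
    have hAval : (PySem.List.sorted keys (fun x => x) false).foldl
        (fun acc item => acc ++ [((ValueToDict l).get? item).getD 0]) []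
        = (order.map K).map (fun k => vals.getD (keys.idxOf k) 0) := by
      rw [PySem.List.foldl_append_singleton_eq_map, List.nil_append, hsorted]
      refine List.map_congr_left ?_
      intro k hkmem
      have hk : k ∈ keys := by
        rw [← hsorted] at hkmem
        exact (PySem.List.mem_sorted _ _ _ _).mp hkmem
      unfold ValueToDict
      rw [← hkeys, ← hvals, get?_foldl_insert_fun]
      simp only [hk, if_true]
      rw [index?_getD_eq_idxOf keys k hk]
      rfl
    have hB : shortOne l = [List.map K order,
        List.map (fun k => vals.getD (List.idxOf k keys) 0) (List.map K order)] := by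
      show [(List.foldl (shortStep keys vals) ([], []) order).1,
            (List.foldl (shortStep keys vals) ([], []) order).2] = _
      rw [hfold]
    rw [hAval, hsorted, hB]

-- ===== VERDICT (by name: the statement is the Claim_ definition above) =====
theorem shortArrays_spec : Claim_equal_shortArrays := by
  intro l1 l2 _ hpre
  unfold Spec_shortArrays shortArrays shortArrays_alt
  exact Prod.ext_iff.mpr ⟨half_eq l1 hpre.1, half_eq l2 hpre.2⟩
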